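-- pv_equiv track=rewrite | github.com/17tangs/RHG | keywords/Load.py | genNum
-- ===== SOURCE A (Python) =====
-- def genNum(l):
--     nums = [0]
--     counter = 0
--     for i in range(1,len(l)):
--         if l[i] != l[i-1]:
--             counter += 1
--         nums.append(counter)
--     return nums
-- ===== SOURCE B (Python) =====
-- from itertools import groupby
--
-- def genNum(l):
--     out = []
--     for g, (_, grp) in enumerate(groupby(l)):
--         out.extend([g] * len(list(grp)))
--     return out
-- ===== Notes on version B (the rewrite author's own statement) =====
-- stated objective: alternative
-- what changed: Replaces A's single index-driven running-counter loop by a run decomposition: itertools.groupby splits the list into maximal runs of equal elements and each run is emitted as a block of its enumerate group index.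
-- intended difference: On the empty list A returns a spurious singleton label list containing 0 (its seed quirk: a label with no element), while B returns the empty list, the intended value since a run-index list must have one entry per element. — e.g. on genNum([]): A returns [0], B returns []
import Mathlib
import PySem

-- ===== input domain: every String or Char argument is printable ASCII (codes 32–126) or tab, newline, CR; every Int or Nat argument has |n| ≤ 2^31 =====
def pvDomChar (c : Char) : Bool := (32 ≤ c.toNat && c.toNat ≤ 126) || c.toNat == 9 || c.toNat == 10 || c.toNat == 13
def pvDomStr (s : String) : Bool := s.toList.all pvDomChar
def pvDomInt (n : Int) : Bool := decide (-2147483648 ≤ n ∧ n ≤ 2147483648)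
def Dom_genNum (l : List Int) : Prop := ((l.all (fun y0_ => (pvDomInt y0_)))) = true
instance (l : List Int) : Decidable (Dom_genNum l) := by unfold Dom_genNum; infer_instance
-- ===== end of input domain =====

-- B replaces A's index-driven running-counter loop by a run decomposition (groupby):
-- split the list into maximal runs of equal elements and emit each run as a block of its group index.

-- ===== PORT A =====
-- indices drawn from range(1, len(l)) are always in range, so pyGetD's default is never used
def genNum (l : List Int) : List Int :=
  ((PySem.List.pyRange 1 l.length 1).foldl
    (fun (st : List Int × Int) i =>
      let counter := if PySem.List.pyGetD l i 0 ≠ PySem.List.pyGetD l (i - 1) 0 then st.2 + 1 else st.2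
      (st.1 ++ [counter], counter))
    ([0], 0)).1

-- ===== PORT B =====
-- itertools.groupby → pvRuns (maximal runs of adjacent equal elements); enumerate → PySem.List.enumerate
def pvRuns : List Int → List (List Int)
  | [] => []
  | x :: xs =>
    let run := xs.takeWhile (fun v => v == x)
    (x :: run) :: pvRuns ((x :: xs).drop (1 + run.length))
termination_by l => l.length
decreasing_by simp

def genNum_alt (l : List Int) : List Int :=
  (PySem.List.enumerate (pvRuns l)).foldl
    (fun (out : List Int) p => out ++ List.replicate p.2.length p.1) []

-- ===== PRECONDITION & SPEC =====
-- On the empty list A returns a spurious singleton label list containing 0 (its seed quirk: a label with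
-- no element), while B returns the empty list, the intended value: one entry per element.
def D_genNum (l : List Int) : Prop := l = []
instance (l : List Int) : Decidable (D_genNum l) := by unfold D_genNum; infer_instance
def Spec_genNum (l : List Int) (out : List Int) : Prop := ¬ D_genNum l → out = genNum_alt l
instance (l : List Int) (out : List Int) : Decidable (Spec_genNum l out) := by unfold Spec_genNum; infer_instance
def pvDiffWitness_genNum : List Int := []
def pvDiffWitnessOut_genNum : (List Int) × (List Int) := ([0], [])

-- ===== CLAIM (what is proved, stated in full; the proofs are below) =====
def Claim_unchanged_genNum : Prop := ∀ (l : List Int), Dom_genNum l → Spec_genNum l (genNum l)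
def Claim_changed_genNum : Prop := Dom_genNum (pvDiffWitness_genNum) ∧ D_genNum (pvDiffWitness_genNum) ∧ genNum (pvDiffWitness_genNum) = pvDiffWitnessOut_genNum.1 ∧ genNum_alt (pvDiffWitness_genNum) = pvDiffWitnessOut_genNum.2 ∧ pvDiffWitnessOut_genNum.1 ≠ pvDiffWitnessOut_genNum.2
def Claim_exact_genNum : Prop := ∀ (l : List Int), Dom_genNum l → D_genNum l → genNum l ≠ genNum_alt l

-- ===== LEMMAS AND PROOFS =====

-- adjacent-difference 0/1 indicators of prev :: rest
def pvIndic : Int → List Int → List Int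
  | _, [] => []
  | p, y :: ys => (if y ≠ p then 1 else 0) :: pvIndic y ys

-- running prefix sums seeded at k
def pvAccum : Int → List Int → List Int
  | _, [] => []
  | k, x :: xs => (k + x) :: pvAccum (k + x) xs

-- A's foldl produces the seed list followed by prefix sums of the per-index indicators
theorem foldl_step (P : Int → Prop) [DecidablePred P] (is : List Int) :
    ∀ (nums : List Int) (c : Int),
    (is.foldl (fun (st : List Int × Int) i =>
        let counter := if P i then st.2 + 1 else st.2
        (st.1 ++ [counter], counter)) (nums, c)).1
      = nums ++ pvAccum c (is.map fun i => if P i then (1 : Int) else 0) := by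
  induction is with
  | nil => intro nums c; simp [pvAccum]
  | cons i is ih =>
      intro nums c
      simp only [List.foldl_cons, List.map_cons, pvAccum]
      by_cases h : P i <;> simp only [h, if_true, if_false] <;>
        rw [ih] <;> simp

-- A's index-based indicators over range(1, len) are pvIndic of the list (pre generalizes the scanned prefix)
theorem map_range_indic (xs : List Int) : ∀ (pre : List Int) (x : Int),
    ((PySem.List.pyRange ((pre.length : Int) + 1) (((pre ++ x :: xs).length : Nat) : Int) 1).map
      (fun i => if PySem.List.pyGetD (pre ++ x :: xs) i 0 ≠ PySem.List.pyGetD (pre ++ x :: xs) (i - 1) 0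
                then (1 : Int) else 0))
    = pvIndic x xs := by
  induction xs with
  | nil =>
      intro pre x
      rw [PySem.List.pyRange_one_eq_nil (by simp)]
      simp [pvIndic]
  | cons y ys ih =>
      intro pre x
      rw [PySem.List.pyRange_one_cons (by simp only [List.length_append, List.length_cons]; push_cast; omega)]
      simp only [List.map_cons]
      have hget : ∀ (k : Nat) (d : Int), PySem.List.pyGetD (pre ++ x :: y :: ys) ((pre.length : Int) + 1 - (1 - k)) d
          = (x :: y :: ys).getD k d := by
        intro k d
        have : (pre.length : Int) + 1 - (1 - (k : Int)) = ((pre.length + k : Nat) : Int) := by push_cast; ring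
        rw [this, PySem.List.pyGetD_natCast]
        simp only [List.getD]
        rw [List.getElem?_append_right (by omega)]
        simp
      have h1 : PySem.List.pyGetD (pre ++ x :: y :: ys) ((pre.length : Int) + 1) 0 = y := by
        have h := hget 1 0
        have e : (pre.length : Int) + 1 - (1 - (1 : Nat)) = (pre.length : Int) + 1 := by push_cast; ring
        rw [e] at h; simpa using h
      have h0 : PySem.List.pyGetD (pre ++ x :: y :: ys) ((pre.length : Int) + 1 - 1) 0 = x := by
        have h := hget 0 0
        have e : (pre.length : Int) + 1 - (1 - (0 : Nat)) = (pre.length : Int) + 1 - 1 := by push_cast; ring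
        rw [e] at h; simpa using h
      have ih' := ih (pre ++ [x]) y
      simp only [List.append_assoc, List.cons_append, List.nil_append] at ih'
      have hlen : ((pre ++ [x]).length : Int) + 1 = (pre.length : Int) + 1 + 1 := by simp
      rw [hlen] at ih'
      rw [h1, h0, ih']
      simp [pvIndic]

-- the indicator list of x :: xs splits at the end of the leading run of x
theorem indic_split (x : Int) (xs : List Int) :
    pvIndic x xs = List.replicate (xs.takeWhile (fun v => v == x)).length 0 ++
      (match xs.dropWhile (fun v => v == x) with
       | [] => []
       | y :: ys => 1 :: pvIndic y ys) := by
  induction xs generalizing x with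
  | nil => simp [pvIndic]
  | cons y ys ih =>
      by_cases h : y = x
      · subst h
        simp only [List.takeWhile_cons, List.dropWhile_cons, beq_self_eq_true, if_true]
        simp [pvIndic, ih y, List.replicate_succ]
      · have hb : (y == x) = false := by simp [h]
        simp [pvIndic, hb, h]

theorem accum_replicate (k : Int) (r : Nat) (t : List Int) :
    pvAccum k (List.replicate r 0 ++ t) = List.replicate r k ++ pvAccum k t := by
  induction r with
  | zero => simp
  | succ n ih => simp [List.replicate_succ, pvAccum, ih]

theorem accum_shift (t : List Int) : ∀ (k c : Int),
    pvAccum (k + c) t = (pvAccum k t).map (· + c) := by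
  induction t with
  | nil => intro k c; simp [pvAccum]
  | cons x xs ih =>
      intro k c
      simp only [pvAccum, List.map_cons]
      have e1 : k + c + x = k + x + c := by ring
      rw [e1, ih]

theorem drop_takeWhile_len (p : Int → Bool) (xs : List Int) :
    xs.drop (xs.takeWhile p).length = xs.dropWhile p := by
  induction xs with
  | nil => simp
  | cons y ys ih => by_cases h : p y <;> simp [h, ih]

-- B's recursion computes 0 followed by the prefix sums of the indicators
-- the run-block output with group indices starting at s
def pvFlat : Int → List (List Int) → List Int
  | _, [] => []
  | s, g :: gs => List.replicate g.length s ++ pvFlat (s + 1) gs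

theorem foldl_enum_flat (gs : List (List Int)) : ∀ (out : List Int) (s : Int),
    (PySem.List.enumerate gs s).foldl
      (fun (out : List Int) p => out ++ List.replicate p.2.length p.1) out
    = out ++ pvFlat s gs := by
  induction gs with
  | nil => intro out s; simp [PySem.List.enumerate_nil, pvFlat]
  | cons g gs ih =>
      intro out s
      rw [PySem.List.enumerate_cons]
      simp only [List.foldl_cons, pvFlat, ih]
      simp

theorem flat_shift (gs : List (List Int)) : ∀ (s : Int),
    pvFlat (s + 1) gs = (pvFlat s gs).map (· + 1) := by
  induction gs with
  | nil => intro s; simp [pvFlat]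
  | cons g gs ih =>
      intro s
      simp only [pvFlat, List.map_append, List.map_replicate, ih]

theorem alt_char : ∀ (n : Nat) (x : Int) (xs : List Int), xs.length < n →
    pvFlat 0 (pvRuns (x :: xs)) = 0 :: pvAccum 0 (pvIndic x xs) := by
  intro n
  induction n with
  | zero => intro x xs h; omega
  | succ n ih =>
      intro x xs hlen
      rw [pvRuns.eq_def]
      show pvFlat 0 ((x :: xs.takeWhile (fun v => v == x)) ::
          pvRuns ((x :: xs).drop (1 + (xs.takeWhile (fun v => v == x)).length)))
        = 0 :: pvAccum 0 (pvIndic x xs)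
      have hdrop : (x :: xs).drop (1 + (xs.takeWhile (fun v => v == x)).length)
          = xs.dropWhile (fun v => v == x) := by
        rw [Nat.add_comm, List.drop_succ_cons, drop_takeWhile_len]
      rw [hdrop, indic_split x xs]
      simp only [pvFlat, List.length_cons, flat_shift]
      cases hd : xs.dropWhile (fun v => v == x) with
      | nil =>
          simp only [pvRuns, pvFlat, List.map_nil, List.append_nil]
          have ha := accum_replicate 0 (xs.takeWhile (fun v => v == x)).length ([] : List Int)
          simp only [List.append_nil, pvAccum] at ha
          rw [ha]
          simp [List.replicate_succ]
      | cons y ys =>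
          have hys : ys.length < n := by
            have : (y :: ys).length ≤ xs.length := by
              rw [← hd]; exact List.length_dropWhile_le _ _
            simp at this; omega
          rw [ih y ys hys]
          have h1 : pvAccum 0 (1 :: pvIndic y ys) = 1 :: (pvAccum 0 (pvIndic y ys)).map (· + 1) := by
            simp only [pvAccum]
            norm_num
            have := accum_shift (pvIndic y ys) 0 1
            simpa using this
          simp only [accum_replicate, h1]
          simp [List.replicate_succ]

-- ===== VERDICT (by name: the statement is the Claim_ definition above) =====
theorem genNum_spec : Claim_unchanged_genNum := by
  intro l _ hD
  show genNum l = genNum_alt l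
  cases l with
  | nil => exact absurd rfl hD
  | cons x xs =>
      unfold genNum
      rw [foldl_step (fun i => PySem.List.pyGetD (x :: xs) i 0 ≠ PySem.List.pyGetD (x :: xs) (i - 1) 0)]
      have hm := map_range_indic xs [] x
      simp only [List.length_nil, Nat.cast_zero, zero_add, List.nil_append] at hm
      rw [show genNum_alt (x :: xs) = pvFlat 0 (pvRuns (x :: xs)) from by
            unfold genNum_alt; rw [foldl_enum_flat]; simp]
      rw [alt_char (xs.length + 1) x xs (by omega), ← hm]
      simp only [List.singleton_append]
      rfl

theorem genNum_changed : Claim_changed_genNum := by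
  unfold Claim_changed_genNum
  refine ⟨by decide, by decide, by decide, ?_, by decide⟩
  simp [pvDiffWitness_genNum, pvDiffWitnessOut_genNum, genNum_alt, pvRuns,
    PySem.List.enumerate_nil]

theorem genNum_tight : Claim_exact_genNum := by
  intro l _ hD
  subst hD
  simp [genNum, genNum_alt, pvRuns, PySem.List.enumerate_nil, PySem.List.pyRange_one_eq_nil]
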